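-- pv_equiv track=rewrite | github.com/67070018Chanyaphat/PSCP | pasmophobia.py | identify_ghost
-- ===== SOURCE A (Python) =====
-- def identify_ghost(evidence1, evidence2, evidence3):
--     # Ghosts and their evidence
--     ghost_evidence = {
--         "Banshee": ["EMF Level 5", "Fingerprints", "Freezing Temperatures"],
--         "Demon": ["Spirit Box", "Ghost Writing", "Freezing Temperatures"],
--         "Jinn": ["EMF Level 5", "Spirit Box", "Ghost Orb"],
--         "Mare": ["Spirit Box", "Ghost Orb", "Ghost Writing"],
--         "Phantom": ["EMF Level 5", "Ghost Orb", "Freezing Temperatures"],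
--         "Poltergeist": ["Spirit Box", "Fingerprints", "Ghost Writing"],
--         "Revenant": ["EMF Level 5", "Fingerprints", "Ghost Writing"],
--         "Shade": ["EMF Level 5", "Ghost Orb", "Ghost Writing"],
--         "Spirit": ["Spirit Box", "Fingerprints", "Ghost Writing"],
--         "Wraith": ["EMF Level 5", "Spirit Box", "Freezing Temperatures"],
--         "Yurei": ["Ghost Orb", "Ghost Writing", "Freezing Temperatures"]
--     }
--
--     # Normalize evidence to handle 'No evidence'
--     evidence = set([e for e in [evidence1, evidence2, evidence3] if e != "No evidence"])
--
--     possible_ghosts = []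
--     for ghost, ev in ghost_evidence.items():
--         if evidence.issubset(ev):
--             possible_ghosts.append(ghost)
--
--     if possible_ghosts:
--         return "\n".join(sorted(possible_ghosts))
--     else:
--         return "Not yet discovered"
-- ===== SOURCE B (Python) =====
-- def identify_ghost(evidence1, evidence2, evidence3):
--     # Inverted index: evidence type -> set of ghosts exhibiting it
--     ghosts = ["Banshee", "Demon", "Jinn", "Mare", "Phantom", "Poltergeist",
--               "Revenant", "Shade", "Spirit", "Wraith", "Yurei"]
--     index = {
--         "EMF Level 5": {"Banshee", "Jinn", "Phantom", "Revenant", "Shade", "Wraith"},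
--         "Fingerprints": {"Banshee", "Poltergeist", "Revenant", "Spirit"},
--         "Freezing Temperatures": {"Banshee", "Demon", "Phantom", "Wraith", "Yurei"},
--         "Spirit Box": {"Demon", "Jinn", "Mare", "Poltergeist", "Spirit", "Wraith"},
--         "Ghost Writing": {"Demon", "Mare", "Poltergeist", "Revenant", "Shade", "Spirit", "Yurei"},
--         "Ghost Orb": {"Jinn", "Mare", "Phantom", "Shade", "Yurei"},
--     }
--     candidates = set(ghosts)
--     for e in (evidence1, evidence2, evidence3):
--         if e != "No evidence":
--             candidates &= index.get(e, set())
--     if candidates: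
--         return "\n".join(sorted(candidates))
--     return "Not yet discovered"
-- ===== Notes on version B (the rewrite author's own statement) =====
-- stated objective: alternative
-- what changed: Replaces A's per-ghost subset test against the ghost->evidence table with an inverted index from evidence type to ghost set, intersected into a candidate set once per present evidence item.
import Mathlib
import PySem

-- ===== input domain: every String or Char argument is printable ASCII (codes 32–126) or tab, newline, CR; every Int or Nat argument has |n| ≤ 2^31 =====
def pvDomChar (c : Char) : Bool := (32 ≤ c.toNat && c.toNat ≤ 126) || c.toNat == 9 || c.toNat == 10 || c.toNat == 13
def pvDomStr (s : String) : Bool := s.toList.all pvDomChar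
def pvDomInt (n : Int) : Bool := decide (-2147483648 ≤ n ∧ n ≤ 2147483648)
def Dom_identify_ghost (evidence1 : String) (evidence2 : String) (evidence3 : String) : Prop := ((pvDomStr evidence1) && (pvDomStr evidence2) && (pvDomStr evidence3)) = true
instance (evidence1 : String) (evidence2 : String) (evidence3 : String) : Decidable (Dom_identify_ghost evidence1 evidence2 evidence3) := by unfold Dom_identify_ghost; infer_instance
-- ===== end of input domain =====

-- B replaces A's per-ghost subset test with an inverted index (evidence → ghost set) intersected per present evidence item: an alternative decomposition of the same lookup.

-- ===== PORT A =====
def pvGhostEvidence : PySem.Dict String (List String) := PySem.Dict.ofList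
  [ ("Banshee", ["EMF Level 5", "Fingerprints", "Freezing Temperatures"])
  , ("Demon", ["Spirit Box", "Ghost Writing", "Freezing Temperatures"])
  , ("Jinn", ["EMF Level 5", "Spirit Box", "Ghost Orb"])
  , ("Mare", ["Spirit Box", "Ghost Orb", "Ghost Writing"])
  , ("Phantom", ["EMF Level 5", "Ghost Orb", "Freezing Temperatures"])
  , ("Poltergeist", ["Spirit Box", "Fingerprints", "Ghost Writing"])
  , ("Revenant", ["EMF Level 5", "Fingerprints", "Ghost Writing"])
  , ("Shade", ["EMF Level 5", "Ghost Orb", "Ghost Writing"])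
  , ("Spirit", ["Spirit Box", "Fingerprints", "Ghost Writing"])
  , ("Wraith", ["EMF Level 5", "Spirit Box", "Freezing Temperatures"])
  , ("Yurei", ["Ghost Orb", "Ghost Writing", "Freezing Temperatures"]) ]

def identify_ghost (evidence1 : String) (evidence2 : String) (evidence3 : String) : String :=
  let evidence : PySem.Set String :=
    PySem.Set.ofList (List.filter (fun e => e != "No evidence") [evidence1, evidence2, evidence3])
  let possible_ghosts : List String :=
    pvGhostEvidence.items.foldl
      (fun acc p => if PySem.Set.issubset evidence p.2 then acc ++ [p.1] else acc) []
  if possible_ghosts ≠ [] then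
    PySem.Str.join "\n" (PySem.List.sorted possible_ghosts (fun x => x) false)
  else
    "Not yet discovered"

-- ===== PORT B =====
def pvGhostNames : List String :=
  ["Banshee", "Demon", "Jinn", "Mare", "Phantom", "Poltergeist",
   "Revenant", "Shade", "Spirit", "Wraith", "Yurei"]

def pvEvidenceIndex : PySem.Dict String (PySem.Set String) := PySem.Dict.ofList
  [ ("EMF Level 5", PySem.Set.ofList ["Banshee", "Jinn", "Phantom", "Revenant", "Shade", "Wraith"])
  , ("Fingerprints", PySem.Set.ofList ["Banshee", "Poltergeist", "Revenant", "Spirit"])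
  , ("Freezing Temperatures", PySem.Set.ofList ["Banshee", "Demon", "Phantom", "Wraith", "Yurei"])
  , ("Spirit Box", PySem.Set.ofList ["Demon", "Jinn", "Mare", "Poltergeist", "Spirit", "Wraith"])
  , ("Ghost Writing", PySem.Set.ofList ["Demon", "Mare", "Poltergeist", "Revenant", "Shade", "Spirit", "Yurei"])
  , ("Ghost Orb", PySem.Set.ofList ["Jinn", "Mare", "Phantom", "Shade", "Yurei"]) ]

def identify_ghost_alt (evidence1 : String) (evidence2 : String) (evidence3 : String) : String :=
  let candidates : PySem.Set String :=
    [evidence1, evidence2, evidence3].foldl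
      (fun c e =>
        if e != "No evidence" then
          PySem.Set.inter c (pvEvidenceIndex.getD e PySem.Set.empty)
        else c)
      (PySem.Set.ofList pvGhostNames)
  if candidates ≠ [] then
    PySem.Str.join "\n" (PySem.List.sorted candidates (fun x => x) false)
  else
    "Not yet discovered"

-- ===== PRECONDITION & SPEC =====
def Spec_identify_ghost (evidence1 : String) (evidence2 : String) (evidence3 : String) (out : String) : Prop := out = identify_ghost_alt evidence1 evidence2 evidence3
instance (evidence1 : String) (evidence2 : String) (evidence3 : String) (out : String) : Decidable (Spec_identify_ghost evidence1 evidence2 evidence3 out) := by unfold Spec_identify_ghost; infer_instance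

-- ===== CLAIM (what is proved, stated in full; the proofs are below) =====
def Claim_equal_identify_ghost : Prop := ∀ (evidence1 : String) (evidence2 : String) (evidence3 : String), Dom_identify_ghost evidence1 evidence2 evidence3 → Spec_identify_ghost evidence1 evidence2 evidence3 (identify_ghost evidence1 evidence2 evidence3)

-- ===== LEMMAS AND PROOFS =====

-- one intersection step of B is a filter of the candidate list
lemma pv_step_eq (c : PySem.Set String) (e : String) :
    (if e != "No evidence" then PySem.Set.inter c (pvEvidenceIndex.getD e PySem.Set.empty) else c)
    = c.filter (fun g => e == "No evidence" || PySem.Set.contains (pvEvidenceIndex.getD e PySem.Set.empty) g) := by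
  by_cases h : e = "No evidence"
  · simp [h, List.filter_true]
  · have hb : (e == "No evidence") = false := by simp [h]
    simp [PySem.Set.inter, PySem.Set.contains, hb]
    exact fun he => absurd he h

-- membership of a table ghost in the inverted-index entry agrees with A's evidence list
lemma pv_contains_idx (e : String) :
    ∀ p ∈ pvGhostEvidence.items,
      PySem.Set.contains (pvEvidenceIndex.getD e PySem.Set.empty) p.1 = decide (e ∈ p.2) := by
  by_cases h1 : e = "EMF Level 5"
  · subst h1; decide
  by_cases h2 : e = "Fingerprints"
  · subst h2; decide
  by_cases h3 : e = "Freezing Temperatures"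
  · subst h3; decide
  by_cases h4 : e = "Spirit Box"
  · subst h4; decide
  by_cases h5 : e = "Ghost Writing"
  · subst h5; decide
  by_cases h6 : e = "Ghost Orb"
  · subst h6; decide
  · intro p hp
    have hk : pvEvidenceIndex.keys = ["EMF Level 5", "Fingerprints", "Freezing Temperatures",
        "Spirit Box", "Ghost Writing", "Ghost Orb"] := by decide
    have hget : pvEvidenceIndex.get? e = none := by
      rw [PySem.Dict.get?_eq_none_iff_not_mem_keys, hk]
      simp [h1, h2, h3, h4, h5, h6]
    have hidx : pvEvidenceIndex.getD e PySem.Set.empty = PySem.Set.empty := by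
      simp [PySem.Dict.getD, hget]
    rw [hidx]
    fin_cases hp <;> simp [PySem.Set.contains, PySem.Set.empty, h1, h2, h3, h4, h5, h6]

-- the two candidate lists coincide
lemma pv_lists_eq (e1 e2 e3 : String) :
    pvGhostEvidence.items.foldl
      (fun acc p =>
        if PySem.Set.issubset
            (PySem.Set.ofList (List.filter (fun e => e != "No evidence") [e1, e2, e3])) p.2
        then acc ++ [p.1] else acc) []
    = [e1, e2, e3].foldl
      (fun c e =>
        if e != "No evidence" then
          PySem.Set.inter c (pvEvidenceIndex.getD e PySem.Set.empty)
        else c)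
      (PySem.Set.ofList pvGhostNames) := by
  rw [PySem.List.foldl_append_if]
  simp only [List.foldl, pv_step_eq, List.filter_filter, List.nil_append]
  rw [show (PySem.Set.ofList pvGhostNames : List String)
        = pvGhostEvidence.items.map (fun p => p.1) from by decide]
  rw [List.filter_map]
  apply congrArg
  apply List.filter_congr
  intro p hp
  simp only [Function.comp_apply]
  rw [pv_contains_idx e1 p hp, pv_contains_idx e2 p hp, pv_contains_idx e3 p hp]
  rw [Bool.eq_iff_iff]
  simp only [PySem.Set.issubset_iff, PySem.Set.mem_ofList, List.mem_filter,
    Bool.and_eq_true, Bool.or_eq_true, beq_iff_eq, decide_eq_true_eq, bne_iff_ne, ne_eq,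
    List.mem_cons, List.not_mem_nil, or_false]
  constructor
  · intro h
    refine ⟨?_, ?_, ?_⟩
    · by_cases hno : e3 = "No evidence"
      · exact Or.inl hno
      · exact Or.inr (h e3 ⟨Or.inr (Or.inr rfl), hno⟩)
    · by_cases hno : e2 = "No evidence"
      · exact Or.inl hno
      · exact Or.inr (h e2 ⟨Or.inr (Or.inl rfl), hno⟩)
    · by_cases hno : e1 = "No evidence"
      · exact Or.inl hno
      · exact Or.inr (h e1 ⟨Or.inl rfl, hno⟩)
  · rintro ⟨h3, h2, h1⟩ x ⟨hmem, hne⟩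
    rcases hmem with rfl | rfl | rfl
    · exact h1.resolve_left hne
    · exact h2.resolve_left hne
    · exact h3.resolve_left hne

theorem identify_ghost_spec : Claim_equal_identify_ghost := by
  intro e1 e2 e3 _
  show identify_ghost e1 e2 e3 = identify_ghost_alt e1 e2 e3
  simp only [identify_ghost, identify_ghost_alt]
  rw [pv_lists_eq]
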